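-- pv_equiv track=rewrite | github.com/snagine/PytestProj | algos/base_algos.py | find_largest_non_repeated
-- ===== SOURCE A (Python) =====
-- def find_largest_non_repeated(nums):
--     seen = []
--     removed = []
--     for i in range(len(nums)):
--         if nums[i] in seen:
--             seen.remove(nums[i])
--             removed.append(nums[i])
--         else:
--             if nums[i] not in removed:
--                 seen.append(nums[i])
--     return -1 if len(seen) == 0 else max(seen)
-- ===== SOURCE B (Python) =====
-- def find_largest_non_repeated(nums):
--     s = sorted(nums)  # does not mutate the argument
--     best = -1
--     i = 0
--     n = len(s)
--     while i < n:
--         j = i + 1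
--         while j < n and s[j] == s[i]:
--             j += 1
--         if j == i + 1:          # run of length 1: a unique value
--             best = s[i]         # runs are ascending, so the last one kept is the largest
--         i = j
--     return best
-- ===== Notes on version B (the rewrite author's own statement) =====
-- stated objective: faster
-- what changed: Replaces the seen/removed bookkeeping lists with inner membership scans by a sort followed by one linear scan over runs of equal values, keeping the value of each run of length exactly 1.
import Mathlib
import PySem

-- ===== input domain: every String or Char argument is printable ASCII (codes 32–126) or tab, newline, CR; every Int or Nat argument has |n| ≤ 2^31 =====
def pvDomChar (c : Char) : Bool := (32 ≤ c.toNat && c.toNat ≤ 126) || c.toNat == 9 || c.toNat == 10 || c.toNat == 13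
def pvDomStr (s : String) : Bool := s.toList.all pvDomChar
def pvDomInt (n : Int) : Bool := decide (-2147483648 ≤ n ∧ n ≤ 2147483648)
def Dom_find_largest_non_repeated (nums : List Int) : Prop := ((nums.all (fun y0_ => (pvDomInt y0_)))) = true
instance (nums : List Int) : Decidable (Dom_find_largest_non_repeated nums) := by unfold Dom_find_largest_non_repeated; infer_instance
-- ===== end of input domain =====

-- B is a different algorithm (sort + single run-scan, O(n log n)) producing A's exact value; timing-measured faster.

-- ===== PORT A =====
-- the loop body of A: branch order as in the Python; 'seen.remove(x)' only runs when x ∈ seen,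
-- so '(remove? …).getD' never uses its default
def fnrStep (st : List Int × List Int) (x : Int) : List Int × List Int :=
  if x ∈ st.1 then ((PySem.List.remove? st.1 x).getD st.1, st.2 ++ [x])
  else if x ∈ st.2 then st
  else (st.1 ++ [x], st.2)

-- 'for i in range(len(nums)): … nums[i] …' reads nums[0..n-1] in order: folded over nums directly (exact, index always in range)
def find_largest_non_repeated (nums : List Int) : Int :=
  let st := nums.foldl fnrStep ([], [])
  if st.1.length = 0 then -1 else (PySem.List.max? st.1 (fun y => y)).getD (-1)

-- ===== PORT B =====
-- the outer while loop of Source B: each step consumes one run of equal values (the inner while = takeWhile/dropWhile)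
def fnrScan (l : List Int) (best : Int) : Int :=
  match l with
  | [] => best
  | x :: rest =>
      fnrScan (rest.dropWhile (fun y => y == x))
        (if rest.takeWhile (fun y => y == x) = [] then x else best)
  termination_by l.length
  decreasing_by
    simp only [List.length_cons]
    exact Nat.lt_succ_of_le (List.Sublist.length_le (List.dropWhile_sublist _))

def find_largest_non_repeated_alt (nums : List Int) : Int :=
  fnrScan (PySem.List.sorted nums (fun x => x) false) (-1)

-- ===== PRECONDITION & SPEC =====
def Spec_find_largest_non_repeated (nums : List Int) (out : Int) : Prop := out = find_largest_non_repeated_alt nums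
instance (nums : List Int) (out : Int) : Decidable (Spec_find_largest_non_repeated nums out) := by unfold Spec_find_largest_non_repeated; infer_instance

-- ===== CLAIM (what is proved, stated in full; the proofs are below) =====
def Claim_equal_find_largest_non_repeated : Prop := ∀ (nums : List Int), Dom_find_largest_non_repeated nums → Spec_find_largest_non_repeated nums (find_largest_non_repeated nums)

-- ===== LEMMAS AND PROOFS =====

-- "last element, or the default" — what B's best-accumulator computes over the list of unique values
def lastD (l : List Int) (b : Int) : Int := l.foldl (fun _ x => x) b

lemma lastD_eq_getLast (l : List Int) (b : Int) (h : l ≠ []) : lastD l b = l.getLast h := by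
  induction l generalizing b with
  | nil => exact absurd rfl h
  | cons x t ih =>
    by_cases ht : t = []
    · subst ht; simp [lastD]
    · rw [List.getLast_cons ht]
      simpa [lastD] using ih x ht

lemma erase_eq_filter_of_count_one (l : List Int) (a : Int) (h : l.count a = 1) :
    l.erase a = l.filter (fun x => !(x == a)) := by
  induction l with
  | nil => simp
  | cons x t ih =>
    by_cases hx : x = a
    · subst hx
      have ht : t.count x = 0 := by simpa [List.count_cons] using h
      have : t.filter (fun y => !(y == x)) = t := by
        apply List.filter_eq_self.2
        intro y hy
        simp only [Bool.not_eq_eq_eq_not, Bool.not_true, beq_eq_false_iff_ne]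
        intro he; subst he
        exact absurd ht (by simp [List.count_eq_zero, hy])
      simp [this]
    · have ht : t.count a = 1 := by simpa [List.count_cons, hx] using h
      simp [hx, ih ht]

lemma step_key (p seen removed : List Int) (a : Int)
    (hs : seen = p.filter (fun x => p.count x == 1))
    (hr : ∀ x : Int, x ∈ removed ↔ 2 ≤ p.count x) :
    (fnrStep (seen, removed) a).1 = (p ++ [a]).filter (fun x => (p ++ [a]).count x == 1)
    ∧ ∀ x : Int, x ∈ (fnrStep (seen, removed) a).2 ↔ 2 ≤ (p ++ [a]).count x := by
  have hmem_seen : a ∈ seen ↔ p.count a = 1 := by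
    subst hs
    simp only [List.mem_filter, beq_iff_eq]
    exact ⟨fun ⟨_, h⟩ => h, fun h => ⟨List.count_pos_iff.1 (by omega), h⟩⟩
  by_cases hma : a ∈ seen
  · -- second occurrence: p.count a = 1
    have hca : p.count a = 1 := hmem_seen.1 hma
    have hrem : (PySem.List.remove? seen a).getD seen = seen.erase a := by
      rw [PySem.List.remove?_eq_some_erase seen a hma]; rfl
    have hcnt : seen.count a = 1 := by
      rw [hs, List.count_filter (by simp [hca])]; exact hca
    constructor
    · show (if a ∈ seen then _ else _ : List Int × List Int).1 = _
      rw [if_pos hma]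
      show (PySem.List.remove? seen a).getD seen = _
      rw [hrem, erase_eq_filter_of_count_one seen a hcnt, hs, List.filter_filter,
        List.filter_append]
      have h2 : ([a].filter (fun x => (p ++ [a]).count x == 1)) = [] := by
        simp [List.count_append, hca]
      rw [h2, List.append_nil]
      apply List.filter_congr
      intro x hx
      by_cases hxa : x = a
      · subst hxa; simp [List.count_append, hca]
      · have hcx : List.count x [a] = 0 := by simp [Ne.symm hxa]
        simp [List.count_append, hcx]
        exact fun _ => hxa
    · intro x
      show x ∈ (if a ∈ seen then _ else _ : List Int × List Int).2 ↔ _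
      rw [if_pos hma]
      show x ∈ removed ++ [a] ↔ _
      by_cases hxa : x = a
      · subst hxa; simp [List.count_append, hca]
      · have hcx : List.count x [a] = 0 := by simp [Ne.symm hxa]
        simp [List.count_append, hcx, hr x]
        exact fun h => absurd h hxa
  · by_cases hmr : a ∈ removed
    · have hca : 2 ≤ p.count a := (hr a).1 hmr
      constructor
      · show (if a ∈ seen then _ else _ : List Int × List Int).1 = _
        rw [if_neg hma, if_pos hmr]
        show seen = _
        rw [List.filter_append]
        have h2 : ([a].filter (fun x => (p ++ [a]).count x == 1)) = [] := by
          simp [List.count_append]; omega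
        rw [h2, List.append_nil, hs]
        apply List.filter_congr
        intro x hx
        by_cases hxa : x = a
        · subst hxa; simp [List.count_append]; omega
        · have hcx : List.count x [a] = 0 := by simp [Ne.symm hxa]
          simp [List.count_append, hcx]
      · intro x
        show x ∈ (if a ∈ seen then _ else _ : List Int × List Int).2 ↔ _
        rw [if_neg hma, if_pos hmr]
        by_cases hxa : x = a
        · subst hxa
          have hcx : List.count x [x] = 1 := by simp
          simp only [List.count_append, hcx]
          simp [hmr]
          exact List.count_pos_iff.1 (by omega)
        · have hcx : List.count x [a] = 0 := by simp [Ne.symm hxa]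
          simp [List.count_append, hcx, hr x]
    · have hca : p.count a = 0 := by
        have h1 : p.count a ≠ 1 := fun h => hma (hmem_seen.2 h)
        have h2 : ¬ 2 ≤ p.count a := fun h => hmr ((hr a).2 h)
        omega
      have hap : a ∉ p := by rwa [← List.count_eq_zero]
      constructor
      · show (if a ∈ seen then _ else _ : List Int × List Int).1 = _
        rw [if_neg hma, if_neg hmr]
        show seen ++ [a] = _
        rw [List.filter_append]
        have h2 : ([a].filter (fun x => (p ++ [a]).count x == 1)) = [a] := by
          simp [List.count_append, hca]
        rw [h2, hs]
        congr 1
        apply List.filter_congr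
        intro x hx
        have hxa : x ≠ a := fun h => hap (h ▸ hx)
        have hcx : List.count x [a] = 0 := by simp [Ne.symm hxa]
        simp [List.count_append, hcx]
      · intro x
        show x ∈ (if a ∈ seen then _ else _ : List Int × List Int).2 ↔ _
        rw [if_neg hma, if_neg hmr]
        by_cases hxa : x = a
        · subst hxa; simp [List.count_append, hca, hr x]
        · have hcx : List.count x [a] = 0 := by simp [Ne.symm hxa]
          simp [List.count_append, hcx, hr x]

-- invariant of A's loop: after processing prefix p, seen is exactly the (in-order) values occurring once in p,
-- and removed holds exactly the values occurring at least twice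
lemma loopA_inv (rest : List Int) : ∀ (p seen removed : List Int),
    seen = p.filter (fun x => p.count x == 1) →
    (∀ x : Int, x ∈ removed ↔ 2 ≤ p.count x) →
    (rest.foldl fnrStep (seen, removed)).1
      = (p ++ rest).filter (fun x => (p ++ rest).count x == 1) := by
  induction rest with
  | nil => intro p seen removed hs _; simpa using hs
  | cons a rest ih =>
    intro p seen removed hs hr
    have key := step_key p seen removed a hs hr
    have h1 : fnrStep (seen, removed) a
        = ((p ++ [a]).filter (fun x => (p ++ [a]).count x == 1),
           (fnrStep (seen, removed) a).2) := by
      exact Prod.ext key.1 rfl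
    have := ih (p ++ [a]) (fnrStep (seen, removed) a).1 (fnrStep (seen, removed) a).2
      (by rw [h1]) key.2
    calc ((a :: rest).foldl fnrStep (seen, removed)).1
        = (rest.foldl fnrStep (fnrStep (seen, removed) a)).1 := by simp [List.foldl_cons]
      _ = ((p ++ [a]) ++ rest).filter (fun x => ((p ++ [a]) ++ rest).count x == 1) := this
      _ = (p ++ a :: rest).filter (fun x => (p ++ a :: rest).count x == 1) := by
          simp

-- last of the unique values of a sorted list is what B's scan computes
lemma mem_le_getLast (l : List Int) (hp : l.Pairwise (· ≤ ·)) (x : Int) (hx : x ∈ l)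
    (h : l ≠ []) : x ≤ l.getLast h := by
  induction l with
  | nil => cases hx
  | cons a t ih =>
    rcases List.mem_cons.1 hx with rfl | hxt
    · by_cases ht : t = []
      · subst ht; simp
      · rw [List.getLast_cons ht]
        exact (List.pairwise_cons.1 hp).1 _ (List.getLast_mem ht)
    · have ht : t ≠ [] := List.ne_nil_of_mem hxt
      rw [List.getLast_cons ht]
      exact ih (List.pairwise_cons.1 hp).2 hxt ht

-- B's scan over a sorted list computes the last (= largest) value whose run has length 1
lemma scan_eq (n : Nat) : ∀ (l : List Int), l.length ≤ n → l.Pairwise (· ≤ ·) → ∀ best,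
    fnrScan l best = lastD (l.filter (fun x => l.count x == 1)) best := by
  induction n with
  | zero =>
    intro l hl _ best
    have : l = [] := List.eq_nil_of_length_eq_zero (Nat.le_zero.1 hl)
    subst this; simp [fnrScan, lastD]
  | succ n ih =>
    intro l hl hp best
    match l with
    | [] => simp [fnrScan, lastD]
    | x :: rest =>
      have hle : ∀ y ∈ rest, x ≤ y := (List.pairwise_cons.1 hp).1
      have hpr : rest.Pairwise (· ≤ ·) := (List.pairwise_cons.1 hp).2
      obtain ⟨run, tail, hrundef, htaildef⟩ :
          ∃ run tail, run = rest.takeWhile (fun y => y == x)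
            ∧ tail = rest.dropWhile (fun y => y == x) := ⟨_, _, rfl, rfl⟩
      have hsplit : run ++ tail = rest := by
        rw [hrundef, htaildef]; exact List.takeWhile_append_dropWhile
      have hrun : ∀ y ∈ run, y = x := by
        intro y hy
        rw [hrundef] at hy
        exact beq_iff_eq.1 (List.mem_takeWhile_imp (p := fun y => y == x) (l := rest) hy)
      have hptail : tail.Pairwise (· ≤ ·) := by
        rw [htaildef]; exact hpr.sublist (List.dropWhile_sublist _)
      have htail : ∀ y ∈ tail, x < y := by
        match tail, htaildef with
        | [], _ => intro y hy; cases hy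
        | h :: t, htl =>
          have hne : rest.dropWhile (fun y => y == x) ≠ [] := by rw [← htl]; simp
          have hhx : ((fun y => y == x) ((rest.dropWhile (fun y => y == x)).head hne)) = false :=
            List.head_dropWhile_not _ hne
          have hhead : some ((rest.dropWhile (fun y => y == x)).head hne) = some h := by
            rw [← List.head?_eq_some_head, ← htl]; rfl
          have hhne : h ≠ x := by
            rw [Option.some_inj.1 hhead] at hhx; simpa using hhx
          have hhmem : h ∈ rest := by
            rw [← List.takeWhile_append_dropWhile (p := fun y => y == x) (l := rest), ← htl]
            simp
          have hxh : x < h := lt_of_le_of_ne (hle h hhmem) (Ne.symm hhne)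
          intro y hy
          rcases List.mem_cons.1 hy with rfl | hyt
          · exact hxh
          · have hpt : (h :: t).Pairwise (· ≤ ·) := by rw [htl]; exact hpr.sublist (List.dropWhile_sublist _)
            have : h ≤ y := (List.pairwise_cons.1 hpt).1 y hyt
            omega
      have hcrun : run.count x = run.length := by
        rw [List.count_eq_length]
        intro y hy; exact (hrun y hy).symm
      have hctail : tail.count x = 0 := by
        rw [List.count_eq_zero]
        intro hx; exact absurd rfl (ne_of_gt (htail x hx))
      have hcx : (x :: rest).count x = 1 + run.length := by
        rw [← hsplit]
        simp [List.count_append, hcrun, hctail]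
        omega
      have hcy : ∀ y ∈ tail, (x :: rest).count y = tail.count y := by
        intro y hy
        have hyx : y ≠ x := ne_of_gt (htail y hy)
        have hcr : run.count y = 0 := by
          rw [List.count_eq_zero]
          intro hyr; exact hyx (hrun y hyr)
        rw [← hsplit]
        simp [List.count_append, hcr, Ne.symm hyx]
      have htailfilter : tail.filter (fun y => (x :: rest).count y == 1)
          = tail.filter (fun y => tail.count y == 1) := by
        apply List.filter_congr
        intro y hy; rw [hcy y hy]
      have hlen : tail.length ≤ n := by
        have h1 : tail.length ≤ rest.length := by
          rw [htaildef]; exact List.Sublist.length_le (List.dropWhile_sublist _)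
        have h2 : rest.length + 1 ≤ n + 1 := by simpa using hl
        omega
      have ihtail := ih tail hlen hptail
      have hscan : fnrScan (x :: rest) best
          = fnrScan tail (if run = [] then x else best) := by
        rw [fnrScan, ← hrundef, ← htaildef]
      have hl2 : x :: rest = (x :: run) ++ tail := by rw [← hsplit]; rfl
      have hfilter : (x :: rest).filter (fun y => (x :: rest).count y == 1)
          = ((x :: run).filter (fun y => (x :: rest).count y == 1))
            ++ tail.filter (fun y => tail.count y == 1) := by
        rw [congrArg (List.filter (fun y => List.count y (x :: rest) == 1)) hl2,
          List.filter_append, htailfilter]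
      by_cases hnil : run = []
      · have hq : ((fun y => (x :: rest).count y == 1) x) = true := by
          show ((x :: rest).count x == 1) = true
          rw [hcx, hnil]
          rfl
        have : (x :: run).filter (fun y => (x :: rest).count y == 1) = [x] := by
          rw [hnil, List.filter_singleton]
          simp only [hq]
          rfl
        rw [hscan, if_pos hnil, ihtail x, hfilter, this]
        rfl
      · have hq : ((fun y => (x :: rest).count y == 1) x) = false := by
          have hrl : run.length ≠ 0 := fun h => hnil (List.eq_nil_of_length_eq_zero h)
          show ((x :: rest).count x == 1) = false
          rw [hcx]
          simp
          omega
        have : (x :: run).filter (fun y => (x :: rest).count y == 1) = [] := by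
          rw [List.filter_eq_nil_iff]
          intro y hy
          rcases List.mem_cons.1 hy with rfl | hyr
          · simpa using hq
          · rw [hrun y hyr]; simpa using hq
        rw [hscan, if_neg hnil, ihtail best, hfilter, this]
        rfl

-- ===== VERDICT (by name: the statement is the Claim_ definition above) =====
theorem find_largest_non_repeated_spec : Claim_equal_find_largest_non_repeated := by
  intro nums _
  show find_largest_non_repeated nums = find_largest_non_repeated_alt nums
  have hA : (nums.foldl fnrStep ([], [])).1
      = nums.filter (fun x => nums.count x == 1) := by
    have := loopA_inv nums [] [] [] (by simp) (by simp)
    simpa using this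
  set u := nums.filter (fun x => nums.count x == 1) with hudef
  set s := PySem.List.sorted nums (fun x => x) false with hsdef
  have hperm : s.Perm nums := PySem.List.sorted_perm nums (fun x => x) false
  have hpw : s.Pairwise (· ≤ ·) := PySem.List.sorted_pairwise nums (fun x => x)
  have hcounts : ∀ x : Int, s.count x = nums.count x := fun x => hperm.count_eq x
  have hsf : s.filter (fun x => s.count x == 1) = s.filter (fun x => nums.count x == 1) := by
    apply List.filter_congr
    intro x _; rw [hcounts x]
  have hup : (s.filter (fun x => nums.count x == 1)).Perm u := hperm.filter _
  have hB : find_largest_non_repeated_alt nums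
      = lastD (s.filter (fun x => nums.count x == 1)) (-1) := by
    rw [find_largest_non_repeated_alt, scan_eq s.length s le_rfl hpw, hsf]
  rw [find_largest_non_repeated]
  simp only [hA]
  by_cases hu : u = []
  · have hsfe : s.filter (fun x => nums.count x == 1) = [] := by
      rw [← List.length_eq_zero_iff]
      rw [hup.length_eq, hu]; rfl
    rw [hB, hsfe, if_pos (by rw [hu]; rfl)]
    rfl
  · have hlen : ¬ u.length = 0 := fun h => hu (List.eq_nil_of_length_eq_zero h)
    rw [hB, if_neg hlen]
    have hsfne : s.filter (fun x => nums.count x == 1) ≠ [] := by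
      intro h
      apply hu
      have h2 := hup.symm
      rw [h] at h2
      exact List.Perm.eq_nil h2
    obtain ⟨m, hm⟩ : ∃ m, PySem.List.max? u (fun y => y) = some m := by
      cases hmm : PySem.List.max? u (fun y => y) with
      | none => exact absurd ((PySem.List.max?_eq_none_iff u (fun y => y)).1 hmm) hu
      | some m => exact ⟨m, rfl⟩
    have hmmem : m ∈ u := PySem.List.max?_mem hm
    have hmax : ∀ y ∈ u, y ≤ m := PySem.List.max?_isMax hm
    have hpwf : (s.filter (fun x => nums.count x == 1)).Pairwise (· ≤ ·) := hpw.filter _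
    rw [lastD_eq_getLast _ _ hsfne, hm]
    have h1 : (s.filter (fun x => nums.count x == 1)).getLast hsfne ≤ m :=
      hmax _ (hup.mem_iff.1 (List.getLast_mem hsfne))
    have h2 : m ≤ (s.filter (fun x => nums.count x == 1)).getLast hsfne :=
      mem_le_getLast _ hpwf m (hup.mem_iff.2 hmmem) hsfne
    show Option.getD (some m) (-1) = _
    simp only [Option.getD_some]
    omega
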